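-- pv_equiv track=rewrite | github.com/albidgy/FLIC_article | compare_w_ref/05_calc_iso_stat_ref.py | get_exons_l
-- ===== SOURCE A (Python) =====
-- def get_exons_l(introns_l, start_transcript, end_transcript):
--     exons_l = []
--     next_exon_start = start_transcript
--     for intron in introns_l:
--         exons_l.append((next_exon_start, intron[0] - 1))
--         next_exon_start = intron[1] + 1
--     exons_l.append((next_exon_start, end_transcript))
--     return exons_l
-- ===== SOURCE B (Python) =====
-- def get_exons_l(introns_l, start_transcript, end_transcript):
--     points = [start_transcript]
--     for a, b in introns_l:
--         points.append(a - 1)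
--         points.append(b + 1)
--     points.append(end_transcript)
--     return list(zip(points[0::2], points[1::2]))
-- ===== Notes on version B (the rewrite author's own statement) =====
-- stated objective: alternative
-- what changed: B replaces A's running next_exon_start accumulator with a two-phase decomposition: first flatten all boundary cut points into one list, then pair consecutive points into exons.
import Mathlib
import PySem

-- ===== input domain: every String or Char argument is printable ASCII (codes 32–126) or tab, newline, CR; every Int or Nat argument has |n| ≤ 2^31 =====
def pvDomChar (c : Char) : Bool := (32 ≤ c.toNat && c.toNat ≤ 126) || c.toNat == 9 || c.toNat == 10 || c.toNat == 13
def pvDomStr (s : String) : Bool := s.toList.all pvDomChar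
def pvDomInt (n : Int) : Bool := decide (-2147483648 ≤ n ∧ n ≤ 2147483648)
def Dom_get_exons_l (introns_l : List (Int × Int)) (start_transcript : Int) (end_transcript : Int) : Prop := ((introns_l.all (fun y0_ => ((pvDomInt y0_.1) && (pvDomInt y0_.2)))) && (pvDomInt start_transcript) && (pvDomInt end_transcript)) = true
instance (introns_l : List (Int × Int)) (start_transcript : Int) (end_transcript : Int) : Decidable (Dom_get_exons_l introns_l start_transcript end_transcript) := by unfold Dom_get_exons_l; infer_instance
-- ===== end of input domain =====

-- ===== PORT A =====
-- A: running-accumulator loop, transliterated as a foldl over (exons_l, next_exon_start).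
def get_exons_l (introns_l : List (Int × Int)) (start_transcript : Int) (end_transcript : Int) : List (Int × Int) :=
  let st := introns_l.foldl
    (fun (st : List (Int × Int) × Int) (intron : Int × Int) =>
      (st.1 ++ [(st.2, intron.1 - 1)], intron.2 + 1))
    (([] : List (Int × Int)), start_transcript)
  st.1 ++ [(st.2, end_transcript)]

-- ===== PORT B =====
-- B: two-phase — flatten all boundary cut points into one list, then pair consecutive points
-- (zip of points[0::2] with points[1::2]); structurally different decomposition, same cost.
-- every other element starting from the head (= xs[0::2] in Source B)
def pvStep2 : List Int → List Int
  | [] => []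
  | [a] => [a]
  | a :: _ :: rest => a :: pvStep2 rest

def get_exons_l_alt (introns_l : List (Int × Int)) (start_transcript : Int) (end_transcript : Int) : List (Int × Int) :=
  let points := start_transcript :: (introns_l.flatMap (fun i => [i.1 - 1, i.2 + 1]) ++ [end_transcript])
  List.zip (pvStep2 points) (pvStep2 points.tail)

-- ===== PRECONDITION & SPEC =====
def Spec_get_exons_l (introns_l : List (Int × Int)) (start_transcript : Int) (end_transcript : Int) (out : List (Int × Int)) : Prop := out = get_exons_l_alt introns_l start_transcript end_transcript
instance (introns_l : List (Int × Int)) (start_transcript : Int) (end_transcript : Int) (out : List (Int × Int)) : Decidable (Spec_get_exons_l introns_l start_transcript end_transcript out) := by unfold Spec_get_exons_l; infer_instance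

-- ===== CLAIM (what is proved, stated in full; the proofs are below) =====
def Claim_equal_get_exons_l : Prop := ∀ (introns_l : List (Int × Int)) (start_transcript : Int) (end_transcript : Int), Dom_get_exons_l introns_l start_transcript end_transcript → Spec_get_exons_l introns_l start_transcript end_transcript (get_exons_l introns_l start_transcript end_transcript)

-- ===== LEMMAS AND PROOFS =====
theorem pvStep2_cons_cons (a b : Int) (l : List Int) : pvStep2 (a :: b :: l) = a :: pvStep2 l := rfl

theorem foldA_pairs (introns_l : List (Int × Int)) (acc : List (Int × Int)) (s e : Int) :
    (let st := introns_l.foldl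
        (fun (st : List (Int × Int) × Int) (intron : Int × Int) =>
          (st.1 ++ [(st.2, intron.1 - 1)], intron.2 + 1)) (acc, s)
     st.1 ++ [(st.2, e)])
    = acc ++ List.zip
        (pvStep2 (s :: (introns_l.flatMap (fun i => [i.1 - 1, i.2 + 1]) ++ [e])))
        (pvStep2 (introns_l.flatMap (fun i => [i.1 - 1, i.2 + 1]) ++ [e])) := by
  induction introns_l generalizing acc s with
  | nil => simp [pvStep2, List.zip]
  | cons i rest ih =>
      simp only [List.foldl_cons, List.flatMap_cons]
      have := ih (acc ++ [(s, i.1 - 1)]) (i.2 + 1)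
      simp only [this, List.zip, List.cons_append, List.nil_append, pvStep2_cons_cons]
      simp

-- ===== VERDICT (by name: the statement is the Claim_ definition above) =====
theorem get_exons_l_spec : Claim_equal_get_exons_l := by
  intro il s e _
  unfold Spec_get_exons_l get_exons_l get_exons_l_alt
  simpa using foldA_pairs il [] s e
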